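-- pv_equiv track=rewrite | github.com/capseal/capseal | BEF-main/bef_zk/stc/aok_cpu.py | chunk_sketch
-- ===== SOURCE A (Python) =====
-- from typing import List, Optional, Sequence
--
-- MODULUS = (1 << 61) - 1
--
-- def chunk_sketch(values: Sequence[int], offset: int, challenges: Sequence[int]) -> List[int]:
--     sketches: List[int] = []
--     for r in challenges:
--         acc = 0
--         pow_r = pow(r % MODULUS, offset, MODULUS)
--         for val in values:
--             acc = (acc + (int(val) % MODULUS) * pow_r) % MODULUS
--             pow_r = (pow_r * r) % MODULUS
--         sketches.append(acc)
--     return sketches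
-- ===== SOURCE B (Python) =====
-- MODULUS = (1 << 61) - 1
--
-- def _horner(values, r):
--     acc = 0
--     for val in reversed(values):
--         acc = (acc * r + int(val) % MODULUS) % MODULUS
--     return acc
--
-- def chunk_sketch(values, offset, challenges):
--     return [_horner(values, r) * pow(r % MODULUS, offset, MODULUS) % MODULUS
--             for r in challenges]
-- ===== Notes on version B (the rewrite author's own statement) =====
-- stated objective: alternative
-- what changed: B evaluates each challenge's sketch with Horner's rule over the reversed values (maintaining a running polynomial value instead of an incremental power of r) and applies the offset power by a single final multiplication, instead of A's forward loop that tracks pow_r alongside the accumulator.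
import Mathlib
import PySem

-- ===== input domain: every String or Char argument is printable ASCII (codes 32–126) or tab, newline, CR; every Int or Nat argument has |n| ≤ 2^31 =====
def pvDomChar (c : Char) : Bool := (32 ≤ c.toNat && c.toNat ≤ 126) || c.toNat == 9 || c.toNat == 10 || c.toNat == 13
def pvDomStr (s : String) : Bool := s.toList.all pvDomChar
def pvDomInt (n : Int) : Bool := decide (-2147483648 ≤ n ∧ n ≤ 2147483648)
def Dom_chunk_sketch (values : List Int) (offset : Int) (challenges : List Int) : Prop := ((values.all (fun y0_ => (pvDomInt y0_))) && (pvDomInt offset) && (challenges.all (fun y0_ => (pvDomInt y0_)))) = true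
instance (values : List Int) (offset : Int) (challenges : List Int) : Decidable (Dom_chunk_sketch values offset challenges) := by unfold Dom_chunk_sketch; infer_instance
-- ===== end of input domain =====

-- B replaces A's incremental-power accumulation with a Horner evaluation over the
-- reversed values followed by a single multiplication by the offset power (alternative decomposition).


-- MODULUS = (1 << 61) - 1
def pvM : Int := 2305843009213693951

-- Hand port of Python's three-arg pow(b, e, m) (shared by both sides; PySem.Int.powMod
-- computes b^e literally and is infeasible for the exponents in Dom): binary
-- exponentiation, exact for a positive modulus; for a negative exponent Python inverts b
-- mod m, which for the prime m used here equals b^(m-2) mod m whenever b is invertible —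
-- Pre_ excludes the non-invertible case, where Python raises ValueError.
def powModFast (m : Int) (b : Int) (e : Nat) : Int :=
  if _h : e = 0 then PySem.Int.mod 1 m
  else
    let r := powModFast m (PySem.Int.mod (b * b) m) (e / 2)
    if e % 2 = 1 then PySem.Int.mod (b * r) m else r
termination_by e
decreasing_by omega

def pyPow3 (b : Int) (e : Int) (m : Int) : Int :=
  if 0 ≤ e then powModFast m b e.toNat
  else powModFast m (powModFast m b (m - 2).toNat) (-e).toNat

-- ===== PORT A =====
def chunk_sketch (values : List Int) (offset : Int) (challenges : List Int) : List Int :=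
  challenges.foldl (fun sketches r =>
    let st := values.foldl
      (fun (s : Int × Int) val =>
        (PySem.Int.mod (s.1 + (PySem.Int.mod val pvM) * s.2) pvM,
         PySem.Int.mod (s.2 * r) pvM))
      ((0 : Int), pyPow3 (PySem.Int.mod r pvM) offset pvM)
    sketches ++ [st.1]) []

-- ===== PORT B =====
def hornerB (values : List Int) (r : Int) : Int :=
  values.reverse.foldl (fun acc val => PySem.Int.mod (acc * r + PySem.Int.mod val pvM) pvM) 0

def chunk_sketch_alt (values : List Int) (offset : Int) (challenges : List Int) : List Int :=
  challenges.map (fun r =>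
    PySem.Int.mod (hornerB values r * pyPow3 (PySem.Int.mod r pvM) offset pvM) pvM)

-- ===== PRECONDITION & SPEC =====
-- Pre_ excludes exactly the inputs where Python's A raises ValueError: a negative offset
-- together with a challenge ≡ 0 mod the prime modulus (0 has no modular inverse); B raises there too.
def Pre_chunk_sketch (values : List Int) (offset : Int) (challenges : List Int) : Prop :=
  ¬ (offset < 0 ∧ (0 : Int) ∈ challenges)
instance (values : List Int) (offset : Int) (challenges : List Int) : Decidable (Pre_chunk_sketch values offset challenges) := by unfold Pre_chunk_sketch; infer_instance

def pvWitness_chunk_sketch : List Int × Int × List Int := ([3, -5], 2, [7, -2])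

def Spec_chunk_sketch (values : List Int) (offset : Int) (challenges : List Int) (out : List Int) : Prop := out = chunk_sketch_alt values offset challenges
instance (values : List Int) (offset : Int) (challenges : List Int) (out : List Int) : Decidable (Spec_chunk_sketch values offset challenges out) := by unfold Spec_chunk_sketch; infer_instance

-- ===== CLAIM (what is proved, stated in full; the proofs are below) =====
def Claim_equal_chunk_sketch : Prop := ∀ (values : List Int) (offset : Int) (challenges : List Int), Dom_chunk_sketch values offset challenges → Pre_chunk_sketch values offset challenges → Spec_chunk_sketch values offset challenges (chunk_sketch values offset challenges)

-- ===== LEMMAS AND PROOFS =====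

theorem pvM_pos : (0 : Int) < pvM := by norm_num [pvM]

theorem modM_eq (x : Int) : PySem.Int.mod x pvM = x % pvM :=
  PySem.Int.mod_eq_emod_of_pos pvM_pos

theorem emod_modEq (x : Int) : Int.ModEq pvM (x % pvM) x :=
  Int.emod_emod_of_dvd x dvd_rfl

-- Σ (v_i % M) · r^i, written recursively
def polyS (r : Int) : List Int → Int
  | [] => 0
  | v :: vs => v % pvM + r * polyS r vs

theorem foldA_eq (r : Int) (vs : List Int) : ∀ (acc p : Int),
    (vs.foldl
      (fun (s : Int × Int) val =>
        ((s.1 + (val % pvM) * s.2) % pvM, (s.2 * r) % pvM)) (acc % pvM, p)).1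
      = (acc + p * polyS r vs) % pvM := by
  induction vs with
  | nil => intro acc p; simp [polyS]
  | cons v vs ih =>
    intro acc p
    simp only [List.foldl_cons, polyS]
    rw [show ((acc % pvM + (v % pvM) * p) % pvM, (p * r) % pvM)
          = ((acc % pvM + (v % pvM) * p) % pvM % pvM, (p * r) % pvM) by
        rw [Int.emod_emod_of_dvd _ dvd_rfl]]
    rw [ih]
    have h : Int.ModEq pvM
        ((acc % pvM + (v % pvM) * p) % pvM + ((p * r) % pvM) * polyS r vs)
        (acc + (v % pvM) * p + p * r * polyS r vs) :=
      Int.ModEq.add ((emod_modEq _).trans ((emod_modEq acc).add_right _))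
        ((emod_modEq (p * r)).mul_right _)
    rw [show acc + p * (v % pvM + r * polyS r vs)
          = acc + (v % pvM) * p + p * r * polyS r vs by ring]
    exact h

theorem horner_eq (vs : List Int) (r : Int) :
    vs.reverse.foldl (fun acc val => (acc * r + val % pvM) % pvM) 0 = polyS r vs % pvM := by
  induction vs with
  | nil => simp [polyS]
  | cons v vs ih =>
    simp only [List.reverse_cons, List.foldl_append, List.foldl_cons, List.foldl_nil, ih, polyS]
    have h : Int.ModEq pvM ((polyS r vs % pvM) * r + v % pvM)
        (polyS r vs * r + v % pvM) :=
      Int.ModEq.add_right _ ((emod_modEq _).mul_right r)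
    rw [show v % pvM + r * polyS r vs = polyS r vs * r + v % pvM by ring]
    exact h

theorem foldl_push {α β : Type} (f : β → α) (l : List β) : ∀ (init : List α),
    l.foldl (fun sk r => sk ++ [f r]) init = init ++ l.map f := by
  induction l with
  | nil => intro init; simp
  | cons x l ih => intro init; simp [ih]

-- ===== VERDICT (by name: the statement is the Claim_ definition above) =====
theorem chunk_sketch_spec : Claim_equal_chunk_sketch := by
  intro values offset challenges _ _
  unfold Spec_chunk_sketch chunk_sketch chunk_sketch_alt hornerB
  simp only [modM_eq]
  rw [foldl_push (fun r =>
    (values.foldl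
      (fun (s : Int × Int) val =>
        ((s.1 + (val % pvM) * s.2) % pvM, (s.2 * r) % pvM))
      ((0 : Int), pyPow3 (r % pvM) offset pvM)).1) challenges []]
  rw [List.nil_append]
  apply List.map_congr_left
  intro r _
  rw [show ((0 : Int), pyPow3 (r % pvM) offset pvM)
        = ((0 : Int) % pvM, pyPow3 (r % pvM) offset pvM) by simp]
  rw [foldA_eq, horner_eq]
  have h : Int.ModEq pvM ((polyS r values % pvM) * pyPow3 (r % pvM) offset pvM)
      (polyS r values * pyPow3 (r % pvM) offset pvM) :=
    (emod_modEq _).mul_right _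
  rw [show (0 : Int) + pyPow3 (r % pvM) offset pvM * polyS r values
        = polyS r values * pyPow3 (r % pvM) offset pvM by ring]
  exact h.symm
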